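-- pv_equiv track=rewrite | github.com/RideGreg/LeetCode | Python/ternary-expression-parser.py | parseTernary2
-- ===== SOURCE A (Python) =====
-- def parseTernary2(expression): # not push ?, use ? to update a flag
--     if not expression: return ''
--
--     stk, toJudge = [], False
--     for c in reversed(expression):
--         if toJudge:
--             x, y = stk.pop(), stk.pop()
--             stk.append(x if c == 'T' else y)
--             toJudge = False
--         elif c == '?':
--             toJudge = True
--         elif c.isdigit() or c in 'TF':
--             stk.append(c)
--     return stk[-1]
-- ===== SOURCE B (Python) =====
-- def parseTernary2(expression):
--     if not expression:
--         return ''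
--
--     # tokenize right to left: each '?' takes the character on its left as its condition
--     rev = expression[::-1]
--     tokens = []          # postfix order; ('judge', cond) or ('value', v)
--     k = 0
--     while k < len(rev):
--         c = rev[k]
--         if c == '?' and k + 1 < len(rev):
--             tokens.append(('judge', rev[k + 1]))
--             k += 2
--         elif c == '?':
--             k += 1
--         elif c.isdigit() or c in 'TF':
--             tokens.append(('value', c))
--             k += 1
--         else:
--             k += 1
--
--     tokens.reverse()     # now prefix order, left to right
--
--     def ev(k):
--         kind, c = tokens[k]
--         if kind == 'value':
--             return c, k + 1
--         x, k1 = ev(k + 1)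
--         y, k2 = ev(k1)
--         return (x if c == 'T' else y), k2
--
--     return ev(0)[0]
-- ===== Notes on version B (the rewrite author's own statement) =====
-- stated objective: alternative
-- what changed: Replaced the reverse-scan stack machine with a tokenisation pass (each '?' takes the character on its left as its condition) followed by recursive evaluation of the prefix-order token list; Pre_ excludes only the inputs on which A raises IndexError (stack underflow or empty final stack).
import Mathlib
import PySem

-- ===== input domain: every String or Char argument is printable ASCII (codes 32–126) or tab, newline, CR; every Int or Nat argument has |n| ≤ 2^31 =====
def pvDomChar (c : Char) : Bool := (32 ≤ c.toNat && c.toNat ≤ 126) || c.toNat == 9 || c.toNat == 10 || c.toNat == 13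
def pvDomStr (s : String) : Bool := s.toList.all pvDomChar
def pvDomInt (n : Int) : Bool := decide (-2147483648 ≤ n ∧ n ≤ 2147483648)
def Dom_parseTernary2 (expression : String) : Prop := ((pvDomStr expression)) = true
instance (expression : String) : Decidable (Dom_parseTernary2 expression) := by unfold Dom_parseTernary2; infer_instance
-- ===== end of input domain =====

-- B re-implements A's reverse stack scan as tokenisation ('?' takes the character on its
-- left as its condition) followed by recursive evaluation of the prefix token list;
-- alternative algorithm, same O(n) cost; equivalence proved wherever A returns.


-- ===== PORT A =====
-- Python `c.isdigit() or c in 'TF'`; isdigit is exact here as '0' ≤ c ≤ '9' (ASCII domain)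
def pvIsVal (c : Char) : Bool := ('0' ≤ c && c ≤ '9') || c == 'T' || c == 'F'

-- one step of A's loop body; the Python stack is kept head-first (head = top, append = cons,
-- stk.pop() = take the head); `none` models the IndexError of popping a too-short stack
def pvStepA (acc : Option (List Char × Bool)) (c : Char) : Option (List Char × Bool) :=
  match acc with
  | none => none
  | some (stk, toJudge) =>
    if toJudge then
      match stk with
      | x :: y :: rest => some ((if c = 'T' then x else y) :: rest, false)
      | _ => none                    -- stk.pop() raises IndexError
    else if c = '?' then some (stk, true)
    else if pvIsVal c then some (c :: stk, toJudge)
    else some (stk, toJudge)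

def parseTernary2 (expression : String) : String :=
  if expression.toList = [] then "" else
  match expression.toList.reverse.foldl pvStepA (some ([], false)) with
  | some (t :: _, _) => String.ofList [t]  -- stk[-1]
  | _ => ""                            -- IndexError (pop underflow / empty final stack); outside Pre_

-- ===== PORT B =====
-- Source B's tokenizer loop over rev = expression[::-1]: a '?' takes the next reversed character
-- (the character on its left in the original string) as its condition; a token is
-- (true, cond) for 'judge' and (false, v) for 'value', produced in postfix order
def pvTok : List Char → List (Bool × Char)
  | [] => []
  | '?' :: c :: rest => (true, c) :: pvTok rest
  | '?' :: [] => []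
  | c :: rest => if pvIsVal c then (false, c) :: pvTok rest else pvTok rest

-- Source B's recursive `ev(k)` over the (reversed, i.e. prefix-order) token list; the fuel only
-- bounds the recursion depth and is never exhausted on inputs admitted by Pre_
def pvEv (ts : List (Bool × Char)) : Nat → Nat → Option (Char × Nat)
  | 0, _ => none
  | fuel + 1, k =>
    match ts[k]? with
    | none => none                     -- tokens[k] raises IndexError
    | some (false, c) => some (c, k + 1)
    | some (true, c) =>
      match pvEv ts fuel (k + 1) with
      | none => none
      | some (x, k1) =>
        match pvEv ts fuel k1 with
        | none => none
        | some (y, k2) => some (if c = 'T' then x else y, k2)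

def parseTernary2_alt (expression : String) : String :=
  if expression.toList = [] then "" else
  match pvEv (pvTok expression.toList.reverse).reverse
      ((pvTok expression.toList.reverse).reverse.length + 1) 0 with
  | some (v, _) => String.ofList [v]
  | none => ""                          -- IndexError; outside Pre_

-- ===== PRECONDITION & SPEC =====
-- stack-height check over the token list (a balance condition like balanced parentheses,
-- carrying only a counter, no data): a judge token needs height ≥ 2 and lowers it by one, a
-- value raises it, and at the end at least one element must remain
def pvOk : Nat → List (Bool × Char) → Bool
  | h, [] => decide (1 ≤ h)
  | h, (true, _) :: ts => decide (2 ≤ h) && pvOk (h - 1) ts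
  | h, (false, _) :: ts => pvOk (h + 1) ts

-- Pre_ holds exactly where the Python A returns normally: the empty string, or a token
-- sequence whose stack heights never underflow and end nonempty (otherwise A raises
-- IndexError on stk.pop() or stk[-1])
def Pre_parseTernary2 (expression : String) : Prop :=
  expression = "" ∨ pvOk 0 (pvTok expression.toList.reverse) = true

instance (expression : String) : Decidable (Pre_parseTernary2 expression) := by
  unfold Pre_parseTernary2; infer_instance

def pvWitness_parseTernary2 : String := "T?2:3"

def Spec_parseTernary2 (expression : String) (out : String) : Prop := out = parseTernary2_alt expression
instance (expression : String) (out : String) : Decidable (Spec_parseTernary2 expression out) := by unfold Spec_parseTernary2; infer_instance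

-- ===== CLAIM (what is proved, stated in full; the proofs are below) =====
def Claim_equal_parseTernary2 : Prop := ∀ (expression : String), Dom_parseTernary2 expression → Pre_parseTernary2 expression → Spec_parseTernary2 expression (parseTernary2 expression)

-- ===== LEMMAS AND PROOFS =====

-- the token-level stack machine (A's loop without the character scanning)
def pvRunTok : List Char → List (Bool × Char) → Option (List Char)
  | stk, [] => some stk
  | stk, (false, c) :: ts => pvRunTok (c :: stk) ts
  | stk, (true, c) :: ts =>
    match stk with
    | x :: y :: r => pvRunTok ((if c = 'T' then x else y) :: r) ts
    | _ => none

-- prefix-order token lists forming one complete expression, with their value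
inductive PExpP : List (Bool × Char) → Char → Prop
  | val (c : Char) : PExpP [(false, c)] c
  | judge (c : Char) (X Y : List (Bool × Char)) (vx vy : Char) :
      PExpP X vx → PExpP Y vy →
      PExpP ((true, c) :: (X ++ Y)) (if c = 'T' then vx else vy)

-- equation facts for pvTok's overlapping match arms
lemma pvTok_nil : pvTok [] = [] := rfl

lemma pvTok_quest (c : Char) (rest : List Char) :
    pvTok ('?' :: c :: rest) = (true, c) :: pvTok rest := by
  rw [pvTok.eq_def]
  split <;> try simp_all
  rename_i hno hnil heq
  exact absurd heq.2.symm (hno c rest heq.1.symm)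

lemma pvTok_quest_nil : pvTok ['?'] = [] := by
  decide

lemma pvTok_cons (c : Char) (rest : List Char) (h : c ≠ '?') :
    pvTok (c :: rest) = if pvIsVal c then (false, c) :: pvTok rest else pvTok rest := by
  rw [pvTok.eq_def]
  split <;> simp_all

-- A's character fold computes the token machine (the final flag is existential: a trailing
-- '?' of the reversed scan leaves it set without effect)
lemma pvA_tok : ∀ (rev stk stk' : List Char),
    pvRunTok stk (pvTok rev) = some stk' →
    ∃ b, rev.foldl pvStepA (some (stk, false)) = some (stk', b) := by
  intro rev
  induction rev using pvTok.induct with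
  | case1 =>
    intro stk stk' hr
    rw [pvTok_nil, pvRunTok] at hr
    cases hr
    exact ⟨false, rfl⟩
  | case2 c rest ih =>
    intro stk stk' hr
    rw [pvTok_quest] at hr
    cases stk with
    | nil => simp [pvRunTok] at hr
    | cons x stk1 =>
      cases stk1 with
      | nil => simp [pvRunTok] at hr
      | cons y r =>
        simp only [pvRunTok] at hr
        obtain ⟨b, hb⟩ := ih _ _ hr
        refine ⟨b, ?_⟩
        simp only [List.foldl_cons]
        have h1 : pvStepA (some (x :: y :: r, false)) '?' = some (x :: y :: r, true) := by
          simp [pvStepA]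
        have h2 : pvStepA (some (x :: y :: r, true)) c
            = some ((if c = 'T' then x else y) :: r, false) := by
          simp [pvStepA]
        rw [h1, h2, hb]
  | case3 =>
    intro stk stk' hr
    rw [pvTok_quest_nil, pvRunTok] at hr
    cases hr
    refine ⟨true, ?_⟩
    simp [pvStepA]
  | case4 c rest hne1 hne2 hv ih =>
    intro stk stk' hr
    have hq : c ≠ '?' := by
      intro h
      cases rest with
      | nil => exact hne2 h rfl
      | cons a b => exact hne1 a b h rfl
    rw [pvTok_cons c rest hq, if_pos hv, pvRunTok] at hr
    obtain ⟨b, hb⟩ := ih _ _ hr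
    refine ⟨b, ?_⟩
    simp only [List.foldl_cons]
    have h1 : pvStepA (some (stk, false)) c = some (c :: stk, false) := by
      simp [pvStepA, hq, hv]
    rw [h1, hb]
  | case5 c rest hne1 hne2 hv ih =>
    intro stk stk' hr
    have hq : c ≠ '?' := by
      intro h
      cases rest with
      | nil => exact hne2 h rfl
      | cons a b => exact hne1 a b h rfl
    rw [pvTok_cons c rest hq, if_neg hv] at hr
    obtain ⟨b, hb⟩ := ih _ _ hr
    refine ⟨b, ?_⟩
    simp only [List.foldl_cons]
    have h1 : pvStepA (some (stk, false)) c = some (stk, false) := by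
      simp [pvStepA, hq, hv]
    rw [h1, hb]

-- the height check guarantees the token machine succeeds with a nonempty final stack
lemma pvOk_run : ∀ (ts : List (Bool × Char)) (h : Nat) (stk : List Char),
    stk.length = h → pvOk h ts = true →
    ∃ stk', pvRunTok stk ts = some stk' ∧ 1 ≤ stk'.length := by
  intro ts
  induction ts with
  | nil =>
    intro h stk hlen hok
    rw [pvOk] at hok
    exact ⟨stk, rfl, by simp at hok; omega⟩
  | cons t ts ih =>
    obtain ⟨b, c⟩ := t
    cases b with
    | false =>
      intro h stk hlen hok
      rw [pvOk] at hok
      obtain ⟨stk', hr, h1⟩ := ih (h + 1) (c :: stk) (by simp [hlen]) hok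
      exact ⟨stk', by rw [pvRunTok]; exact hr, h1⟩
    | true =>
      intro h stk hlen hok
      rw [pvOk, Bool.and_eq_true, decide_eq_true_eq] at hok
      obtain ⟨h2, hok⟩ := hok
      cases stk with
      | nil => simp at hlen; omega
      | cons x stk1 =>
        cases stk1 with
        | nil => simp at hlen; omega
        | cons y r =>
          obtain ⟨stk', hr, h1⟩ := ih (h - 1) ((if c = 'T' then x else y) :: r)
            (by simp at hlen ⊢; omega) hok
          exact ⟨stk', by simp only [pvRunTok]; exact hr, h1⟩

-- a successful run from an annotated stack (each element carries the prefix token list it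
-- came from) yields prefix expressions for every final element, concatenating to the
-- reversed token sequence
lemma pvRunTok_decomp : ∀ (ts : List (Bool × Char)) (astk : List (List (Bool × Char) × Char)),
    (∀ p ∈ astk, PExpP p.1 p.2) →
    ∀ stk', pvRunTok (astk.map Prod.snd) ts = some stk' →
    ∃ astk' : List (List (Bool × Char) × Char),
      (∀ p ∈ astk', PExpP p.1 p.2) ∧ astk'.map Prod.snd = stk' ∧
      (astk'.map Prod.fst).flatten = ts.reverse ++ (astk.map Prod.fst).flatten := by
  intro ts
  induction ts with
  | nil =>
    intro astk h stk' hr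
    rw [pvRunTok] at hr
    cases hr
    exact ⟨astk, h, rfl, by simp⟩
  | cons t ts ih =>
    obtain ⟨b, c⟩ := t
    cases b with
    | false =>
      intro astk h stk' hr
      rw [pvRunTok] at hr
      obtain ⟨astk', h1, h2, h3⟩ := ih (([(false, c)], c) :: astk)
        (by
          intro p hp
          rcases List.mem_cons.mp hp with h0 | h0
          · subst h0; exact PExpP.val c
          · exact h p h0)
        stk' (by simpa using hr)
      refine ⟨astk', h1, h2, ?_⟩
      rw [h3]
      simp
    | true =>
      intro astk h stk' hr
      cases astk with
      | nil => simp [pvRunTok] at hr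
      | cons ax astk1 =>
        cases astk1 with
        | nil => simp [pvRunTok] at hr
        | cons ay ar =>
        simp only [List.map_cons, pvRunTok] at hr
        obtain ⟨astk', h1, h2, h3⟩ := ih
          (((true, c) :: (ax.1 ++ ay.1), if c = 'T' then ax.2 else ay.2) :: ar)
          (by
            intro p hp
            rcases List.mem_cons.mp hp with h0 | h0
            · subst h0
              exact PExpP.judge c ax.1 ay.1 ax.2 ay.2
                (h ax (by simp)) (h ay (by simp))
            · exact h p (by simp [h0]))
          stk' (by simpa using hr)
        refine ⟨astk', h1, h2, ?_⟩
        rw [h3]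
        simp
  -- the underflow arms of the match are impossible: hr would be `none = some stk'`

-- B's evaluator computes the value of a prefix expression placed anywhere in the token list
lemma pvEv_run : ∀ (e : List (Bool × Char)) (v : Char), PExpP e v →
    ∀ (pre q : List (Bool × Char)) (fuel : Nat), e.length ≤ fuel →
      pvEv (pre ++ e ++ q) fuel pre.length = some (v, pre.length + e.length) := by
  intro e v h
  induction h with
  | val c =>
    intro pre q fuel hfuel
    cases fuel with
    | zero => simp at hfuel
    | succ fuel =>
      rw [pvEv]
      have h0 : (pre ++ [(false, c)] ++ q)[pre.length]? = some (false, c) := by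
        rw [List.append_assoc, List.getElem?_append_right (Nat.le_refl _)]
        simp
      rw [h0]
      simp
  | judge c X Y vx vy hX hY ihX ihY =>
    intro pre q fuel hfuel
    cases fuel with
    | zero => simp at hfuel
    | succ fuel =>
      rw [pvEv]
      have h0 : (pre ++ ((true, c) :: (X ++ Y)) ++ q)[pre.length]? = some (true, c) := by
        rw [List.append_assoc, List.getElem?_append_right (Nat.le_refl _)]
        simp
      rw [h0]
      have hfx : X.length ≤ fuel := by simp at hfuel; omega
      have hcall1 := ihX (pre ++ [(true, c)]) (Y ++ q) fuel hfx
      have e1 : (pre ++ [(true, c)]) ++ X ++ (Y ++ q)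
          = pre ++ ((true, c) :: (X ++ Y)) ++ q := by simp
      rw [e1] at hcall1
      have e1l : (pre ++ [(true, c)]).length = pre.length + 1 := by simp
      rw [e1l] at hcall1
      rw [hcall1]
      dsimp only
      have hfy : Y.length ≤ fuel := by simp at hfuel; omega
      have hcall2 := ihY (pre ++ [(true, c)] ++ X) q fuel hfy
      have e2 : (pre ++ [(true, c)] ++ X) ++ Y ++ q
          = pre ++ ((true, c) :: (X ++ Y)) ++ q := by simp
      rw [e2] at hcall2
      have e2l : (pre ++ [(true, c)] ++ X).length = pre.length + 1 + X.length := by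
        simp only [List.length_append, List.length_cons, List.length_nil]
        try omega
      rw [e2l] at hcall2
      rw [hcall2]
      dsimp only
      have e3 : pre.length + 1 + X.length + Y.length
          = pre.length + ((true, c) :: (X ++ Y)).length := by simp; omega
      rw [e3]

-- ===== VERDICT (by name: the statement is the Claim_ definition above) =====
theorem parseTernary2_spec : Claim_equal_parseTernary2 := by
  intro expression _ hpre
  unfold Spec_parseTernary2
  rcases hpre with h0 | hp
  · subst h0; rfl
  · by_cases hne : expression.toList = []
    · rw [hne] at hp
      simp only [List.reverse_nil, pvTok_nil, pvOk] at hp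
      exact absurd hp (by simp)
    · obtain ⟨stk', hrun, hlen⟩ :=
        pvOk_run (pvTok expression.toList.reverse) 0 [] rfl hp
      obtain ⟨astk', hPE, hsnd, hflat⟩ :=
        pvRunTok_decomp (pvTok expression.toList.reverse) ([] : List (List (Bool × Char) × Char)) (by simp) stk' (by simpa using hrun)
      cases astk' with
      | nil =>
        rw [← hsnd] at hlen
        simp at hlen
      | cons a arest =>
        have hPa : PExpP a.1 a.2 := hPE a (List.mem_cons_self)
        have hflat' : (pvTok expression.toList.reverse).reverse
            = a.1 ++ (arest.map Prod.fst).flatten := by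
          have h := hflat
          simp only [List.map_cons, List.flatten_cons, List.map_nil, List.flatten_nil,
            List.append_nil] at h
          exact h.symm
        -- A's side
        obtain ⟨b, hA⟩ := pvA_tok expression.toList.reverse [] stk' hrun
        rw [← hsnd] at hA
        simp only [List.map_cons] at hA
        -- B's side
        have hfuel : a.1.length ≤ (pvTok expression.toList.reverse).reverse.length + 1 := by
          have := congrArg List.length hflat'
          simp only [List.length_append] at this
          omega
        have hB := pvEv_run a.1 a.2 hPa [] ((arest.map Prod.fst).flatten)
          ((pvTok expression.toList.reverse).reverse.length + 1) hfuel
        simp only [List.nil_append, List.length_nil] at hB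
        rw [← hflat'] at hB
        unfold parseTernary2 parseTernary2_alt
        rw [if_neg hne, if_neg hne, hA, hB]
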